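-- pv_equiv track=rewrite | github.com/nahidbau/MicroLab-Nexus | Beast.py | site_classification
-- ===== SOURCE A (Python) =====
-- from collections import Counter
-- from typing import Dict, List, Optional, Tuple
--
-- def site_classification(records: List[Tuple[str, str]]) -> dict:
--     seqs = [s for _, s in records]
--     L = len(seqs[0])
--
--     variable = 0
--     singleton = 0
--     parsimony_informative = 0
--     constant = 0
--     ambiguous_sites = 0
--
--     for i in range(L):
--         chars = [s[i] for s in seqs]
--         if any(c in {"N", "-", "?"} for c in chars):
--             ambiguous_sites += 1
--
--         clean = [c for c in chars if c not in {"N", "-", "?"}]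
--         uniq = set(clean)
--
--         if len(uniq) <= 1:
--             constant += 1
--             continue
--
--         variable += 1
--         counts = Counter(clean)
--         repeated = sum(1 for v in counts.values() if v >= 2)
--         if repeated >= 2:
--             parsimony_informative += 1
--         else:
--             singleton += 1
--
--     return {
--         "constant_sites": constant,
--         "variable_sites": variable,
--         "singleton_sites": singleton,
--         "parsimony_informative_sites": parsimony_informative,
--         "sites_with_ambiguity_or_gap": ambiguous_sites,
--     }
-- ===== SOURCE B (Python) =====
-- def site_classification(records):
--     # Transpose the alignment with zip, then classify each column by sorting its
--     # clean characters and scanning runs of equal characters (sort + run-length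
--     # scan instead of set/Counter): runs = distinct states, a run of length >= 2
--     # is a repeated state.
--     columns = list(zip(*(s for _, s in records)))
--
--     constant = variable = singleton = parsimony_informative = ambiguous = 0
--     for col in columns:
--         clean = sorted(c for c in col if c not in "N-?")
--         if len(clean) < len(col):
--             ambiguous += 1
--         runs = repeated = 0
--         prev = None
--         runlen = 0
--         for c in clean:
--             if prev == c:
--                 runlen += 1
--                 if runlen == 2:
--                     repeated += 1
--             else:
--                 prev = c
--                 runlen = 1
--                 runs += 1
--         if runs <= 1:
--             constant += 1
--         elif repeated >= 2:
--             variable += 1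
--             parsimony_informative += 1
--         else:
--             variable += 1
--             singleton += 1
--
--     return {
--         "constant_sites": constant,
--         "variable_sites": variable,
--         "singleton_sites": singleton,
--         "parsimony_informative_sites": parsimony_informative,
--         "sites_with_ambiguity_or_gap": ambiguous,
--     }
-- ===== Notes on version B (the rewrite author's own statement) =====
-- stated objective: alternative
-- what changed: A scans column indices and classifies each column with a set and a Counter; B transposes the alignment with zip(*...) and classifies each column by sorting its clean characters and run-length scanning: number of runs = distinct states, runs of length >= 2 = repeated states.
import Mathlib
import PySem

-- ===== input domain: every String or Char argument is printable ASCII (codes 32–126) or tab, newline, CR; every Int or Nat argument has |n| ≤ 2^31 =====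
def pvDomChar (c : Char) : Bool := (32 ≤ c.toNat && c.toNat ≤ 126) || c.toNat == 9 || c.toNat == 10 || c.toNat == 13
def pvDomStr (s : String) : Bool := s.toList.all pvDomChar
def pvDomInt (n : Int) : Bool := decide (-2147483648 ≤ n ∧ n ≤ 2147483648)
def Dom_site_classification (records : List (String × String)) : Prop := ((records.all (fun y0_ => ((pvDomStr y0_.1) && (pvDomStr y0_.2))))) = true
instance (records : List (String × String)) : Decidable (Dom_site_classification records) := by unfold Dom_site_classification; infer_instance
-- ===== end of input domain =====

-- B replaces A's set/Counter classification of each column index by a zip-transpose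
-- of the alignment followed by a sort-and-run-length scan of each column
-- (alternative algorithm, similar cost).

-- ===== PORT A =====
-- c in {"N", "-", "?"}
def pvAmb (c : Char) : Bool := c == 'N' || c == '-' || c == '?'

-- the body of A's 'for i in range(L)' loop; state = (variable, singleton,
-- parsimony_informative, constant, ambiguous_sites)
def pvStepA (seqs : List String) (st : Int × Int × Int × Int × Int) (i : Nat) :
    Int × Int × Int × Int × Int :=
  let chars := seqs.map (fun s => (PySem.Str.pyGet? s (i : Int)).getD ' ')  -- s[i]; in range under Pre_
  let (v, sg, pin, cst, amb) := st
  let amb := if chars.any pvAmb then amb + 1 else amb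
  let clean := chars.filter (fun c => !pvAmb c)
  let uniq := PySem.Set.ofList clean
  if uniq.length ≤ 1 then (v, sg, pin, cst + 1, amb)
  else
    let counts := PySem.Dict.counter clean
    let repeated := (counts.values.filter (fun n => decide (2 ≤ n))).length
    if 2 ≤ repeated then (v + 1, sg, pin + 1, cst, amb)
    else (v + 1, sg + 1, pin, cst, amb)

def site_classification (records : List (String × String)) : List (String × Int) :=
  let seqs := records.map (fun p => p.2)
  match PySem.List.pyGet? seqs 0 with   -- seqs[0]; none = IndexError, excluded by Pre_
  | none => []
  | some s0 =>
    let L := s0.toList.length           -- len(seqs[0]) ≥ 0, so range(L) is List.range L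
    let (v, sg, pin, cst, amb) := (List.range L).foldl (pvStepA seqs) (0, 0, 0, 0, 0)
    [("constant_sites", cst), ("variable_sites", v), ("singleton_sites", sg),
     ("parsimony_informative_sites", pin), ("sites_with_ambiguity_or_gap", amb)]

-- ===== PORT B =====
-- c in "N-?"  (single character, so substring membership = character membership)
def pvAmbB (c : Char) : Bool := "N-?".toList.contains c

-- zip(*(first :: rest)): take heads while every iterator still has an element;
-- structural on the first sequence (zip stops at the shortest iterator)
def pvZipStarAux : List Char → List (List Char) → List (List Char)
  | [], _ => []
  | a :: l, rest =>
      if rest.all (fun r => !r.isEmpty) then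
        (a :: rest.map (fun r => r.headI)) :: pvZipStarAux l (rest.map (fun r => r.tail))
      else []

def pvZipStar : List (List Char) → List (List Char)
  | [] => []
  | f :: rest => pvZipStarAux f rest

-- the run-length scan: state = (runs, repeated, prev, runlen)
def pvRunStep (st : Int × Int × Option Char × Int) (c : Char) : Int × Int × Option Char × Int :=
  let (runs, rep, prev, rl) := st
  if prev = some c then
    let rl := rl + 1
    if rl = 2 then (runs, rep + 1, prev, rl) else (runs, rep, prev, rl)
  else (runs + 1, rep, some c, 1)

-- B's loop body over one column; state = (variable, singleton,
-- parsimony_informative, constant, ambiguous)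
def pvColStep (st : Int × Int × Int × Int × Int) (col : List Char) :
    Int × Int × Int × Int × Int :=
  let (v, sg, pin, cst, amb) := st
  let clean := PySem.List.sorted (col.filter (fun c => !pvAmbB c)) (fun c => c) false
  let amb := if clean.length < col.length then amb + 1 else amb
  let r := clean.foldl pvRunStep (0, 0, none, 0)
  if r.1 ≤ 1 then (v, sg, pin, cst + 1, amb)
  else if 2 ≤ r.2.1 then (v + 1, sg, pin + 1, cst, amb)
  else (v + 1, sg + 1, pin, cst, amb)

def site_classification_alt (records : List (String × String)) : List (String × Int) :=
  let cols := pvZipStar (records.map (fun p => p.2.toList))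
  let (v, sg, pin, cst, amb) := cols.foldl pvColStep (0, 0, 0, 0, 0)
  [("constant_sites", cst), ("variable_sites", v), ("singleton_sites", sg),
   ("parsimony_informative_sites", pin), ("sites_with_ambiguity_or_gap", amb)]

-- ===== PRECONDITION & SPEC =====
-- Pre_ excludes exactly the inputs where the Python A raises IndexError: empty
-- records (seqs[0]) and records whose first sequence is longer than some other
-- sequence (s[i] out of range).
def Pre_site_classification (records : List (String × String)) : Prop :=
  records ≠ [] ∧ ∀ p ∈ records, (records.headI.2).toList.length ≤ p.2.toList.length
instance (records : List (String × String)) : Decidable (Pre_site_classification records) := by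
  unfold Pre_site_classification; infer_instance

def pvWitness_site_classification : (List (String × String)) :=
  [("a", "ACNA"), ("b", "ACGT"), ("c", "AG-T")]

def Spec_site_classification (records : List (String × String)) (out : List (String × Int)) : Prop := out = site_classification_alt records
instance (records : List (String × String)) (out : List (String × Int)) : Decidable (Spec_site_classification records out) := by unfold Spec_site_classification; infer_instance

-- ===== CLAIM (what is proved, stated in full; the proofs are below) =====
def Claim_equal_site_classification : Prop := ∀ (records : List (String × String)), Dom_site_classification records → Pre_site_classification records → Spec_site_classification records (site_classification records)

-- ===== LEMMAS AND PROOFS =====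

theorem pvAmbB_eq (c : Char) : pvAmbB c = pvAmb c := by
  have h : "N-?".toList = ['N', '-', '?'] := rfl
  unfold pvAmbB
  rw [h]
  simp only [List.contains_cons, List.contains_nil, Bool.or_false, pvAmb]
  exact (Bool.or_assoc _ _ _).symm

-- A's loop body, abstracted over the prepared column of characters
def pvClassA (st : Int × Int × Int × Int × Int) (chars : List Char) :
    Int × Int × Int × Int × Int :=
  let (v, sg, pin, cst, amb) := st
  let amb := if chars.any pvAmb then amb + 1 else amb
  let clean := chars.filter (fun c => !pvAmb c)
  let uniq := PySem.Set.ofList clean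
  if uniq.length ≤ 1 then (v, sg, pin, cst + 1, amb)
  else
    let counts := PySem.Dict.counter clean
    let repeated := (counts.values.filter (fun n => decide (2 ≤ n))).length
    if 2 ≤ repeated then (v + 1, sg, pin + 1, cst, amb)
    else (v + 1, sg + 1, pin, cst, amb)

theorem pvStepA_eq (seqs : List String) (st : Int × Int × Int × Int × Int) (i : Nat) :
    pvStepA seqs st i
      = pvClassA st (seqs.map (fun s => (PySem.Str.pyGet? s (i : Int)).getD ' ')) := rfl

-- characterisation of the run-length fold on a sorted list: it counts the
-- distinct values and the values occurring at least twice
def pvD (s : List Char) : Int := ((PySem.Set.ofList s).length : Int)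
def pvR (s : List Char) : Int := ((PySem.Set.ofList s).countP (fun k => 2 ≤ s.count k) : Int)

-- a run's tail (runlen already ≥ 2) only advances runlen
theorem pv_run_tail (c : Char) (t : List Char) (hall : ∀ x ∈ t, x = c) :
    ∀ (runs rep rl : Int), 2 ≤ rl →
    t.foldl pvRunStep (runs, rep, some c, rl) = (runs, rep, some c, rl + t.length) := by
  induction t with
  | nil => intro runs rep rl h; simp
  | cons x t ih =>
      intro runs rep rl h
      have hx : x = c := hall x (by simp)
      subst hx
      have : pvRunStep (runs, rep, some x, rl) x = (runs, rep, some x, rl + 1) := by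
        simp [pvRunStep]; omega
      simp only [List.foldl_cons, this]
      rw [ih (fun y hy => hall y (by simp [hy])) runs rep (rl + 1) (by omega)]
      simp
      ring
-- run started with runlen = 1

-- a freshly started run: repeated is bumped iff the run has a second element
theorem pv_run_one (c : Char) (t : List Char) (hall : ∀ x ∈ t, x = c) (runs rep : Int) :
    t.foldl pvRunStep (runs, rep, some c, 1)
      = (runs, rep + (if t = [] then 0 else 1), some c, 1 + (t.length : Int)) := by
  cases t with
  | nil => simp
  | cons x t =>
      have hx : x = c := hall x (by simp)
      subst hx
      have h1 : pvRunStep (runs, rep, some x, 1) x = (runs, rep + 1, some x, 2) := by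
        simp [pvRunStep]
      simp only [List.foldl_cons, h1]
      rw [pv_run_tail x t (fun y hy => hall y (by simp [hy])) runs (rep + 1) 2 (by omega)]
      simp
      ring

-- under sortedness with strict lower bound c, dropping the leading c-run filters c out

-- under sortedness with lower bound c, dropping the leading c-run is filtering c out
theorem pv_dropWhile_eq_filter (c : Char) (l : List Char)
    (hs : l.Pairwise (· ≤ ·)) (hlb : ∀ x ∈ l, c ≤ x) :
    l.dropWhile (fun x => x == c) = l.filter (fun x => !(x == c)) := by
  induction l with
  | nil => rfl
  | cons a t ih =>
      by_cases ha : a = c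
      · subst ha
        rw [List.dropWhile_cons_of_pos (by simp), List.filter_cons_of_neg (by simp)]
        exact ih (hs.sublist (List.sublist_cons_self a t)) (fun x hx => hlb x (by simp [hx]))
      · rw [List.dropWhile_cons_of_neg (by simp [ha]), List.filter_cons_of_pos (by simp [ha])]
        have hlt : c < a := lt_of_le_of_ne (hlb a (by simp)) (fun h => ha h.symm)
        have : ∀ x ∈ t, ¬(x = c) := by
          intro x hx h
          have := (List.pairwise_cons.mp hs).1 x hx
          subst h; exact absurd (lt_of_lt_of_le hlt this) (lt_irrefl _)
        rw [List.filter_eq_self.mpr (fun x hx => by simpa using this x hx)]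

-- the distinct elements of rest minus c, as a set, in either construction order
theorem pv_perm (rest : List Char) (c : Char) :
    (PySem.Set.ofList (rest.filter (fun x => !(x == c)))).Perm
      (PySem.Set.discard (PySem.Set.ofList rest) c) := by
  apply (List.perm_ext_iff_of_nodup (PySem.Set.nodup_ofList _)
    (PySem.Set.nodup_discard _ _ (PySem.Set.nodup_ofList _))).mpr
  intro x
  simp only [PySem.Set.mem_ofList, PySem.Set.mem_discard, List.mem_filter,
    Bool.not_eq_eq_eq_not, Bool.not_true, beq_eq_false_iff_ne, ne_eq]

theorem pvRunFold_sorted (s : List Char) (hs : s.Pairwise (· ≤ ·))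
    (runs rep : Int) (p : Option Char) (rl : Int)
    (hlb : ∀ x, p = some x → ∀ y ∈ s, x < y) :
    ∃ p' rl', s.foldl pvRunStep (runs, rep, p, rl) = (runs + pvD s, rep + pvR s, p', rl') := by
  induction hn : s.length using Nat.strong_induction_on generalizing s runs rep p rl with
  | _ n ih =>
  cases s with
  | nil =>
      exact ⟨p, rl, by simp [pvD, pvR]⟩
  | cons c rest =>
      have hc : ∀ y ∈ rest, c ≤ y := fun y hy => (List.pairwise_cons.mp hs).1 y hy
      have hrestp : rest.Pairwise (· ≤ ·) := (List.pairwise_cons.mp hs).2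
      set t := rest.takeWhile (fun x => x == c) with ht
      set d := rest.dropWhile (fun x => x == c) with hd
      have hrest : rest = t ++ d := (List.takeWhile_append_dropWhile).symm
      have htc : ∀ x ∈ t, x = c := by
        intro x hx
        rw [ht] at hx
        have hpx := List.mem_takeWhile_imp (p := fun x => x == c) hx
        exact eq_of_beq (by simpa using hpx)
      have hdf : d = rest.filter (fun x => !(x == c)) :=
        pv_dropWhile_eq_filter c rest hrestp hc
      have hdp : d.Pairwise (· ≤ ·) := by rw [hdf]; exact hrestp.sublist List.filter_sublist
      have hdlb : ∀ y ∈ d, c < y := by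
        intro y hy
        rw [hdf, List.mem_filter] at hy
        have h2 : ¬ ((y == c) = true) := by simpa using hy.2
        have hne : y ≠ c := fun h => h2 (by simp [h])
        exact lt_of_le_of_ne (hc y hy.1) hne.symm
      have hcd : c ∉ d := fun h => absurd (hdlb c h) (lt_irrefl _)
      -- first step of the fold
      have hstep : pvRunStep (runs, rep, p, rl) c = (runs + 1, rep, some c, 1) := by
        cases p with
        | none => simp [pvRunStep]
        | some x =>
            have : x ≠ c := ne_of_lt (hlb x rfl c (by simp))
            simp [pvRunStep, this]
      -- counts
      have hcount_t : t.count c = t.length := List.count_eq_length.mpr (fun b hb => (htc b hb).symm)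
      have hcount_d0 : d.count c = 0 := List.count_eq_zero.mpr hcd
      have hrc : rest.count c = t.length := by
        rw [hrest, List.count_append, hcount_t, hcount_d0, Nat.add_zero]
      have hcount_ne : ∀ k, k ≠ c → (c :: rest).count k = d.count k := by
        intro k hk
        rw [hrest]
        simp [Ne.symm hk, List.count_append,
          List.count_eq_zero.mpr (fun hmem : k ∈ t => hk (htc k hmem))]
      -- pvD
      have hperm := pv_perm rest c
      have hperm' : (PySem.Set.ofList d).Perm (PySem.Set.discard (PySem.Set.ofList rest) c) := by
        rw [hdf]; exact pv_perm rest c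
      have hDlen : (PySem.Set.ofList (c :: rest)).length = (PySem.Set.ofList d).length + 1 := by
        rw [PySem.Set.ofList_cons]
        simp [hperm'.length_eq]
      have hD : pvD (c :: rest) = 1 + pvD d := by
        simp [pvD, hDlen]; ring
      -- pvR
      have hpc : (decide (2 ≤ (c :: rest).count c)) = !(t.isEmpty) := by
        rw [List.count_cons_self, hrc]
        cases t <;> simp
      have hR : pvR (c :: rest) = (if t = [] then 0 else 1) + pvR d := by
        unfold pvR
        rw [PySem.Set.ofList_cons, List.countP_cons]
        have h1 : (List.countP (fun k => decide (2 ≤ (c :: rest).count k))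
            (PySem.Set.discard (PySem.Set.ofList rest) c))
            = List.countP (fun k => decide (2 ≤ d.count k)) (PySem.Set.ofList d) := by
          rw [← hperm'.countP_eq]
          apply List.countP_congr
          intro k hk
          have hkc : k ≠ c := fun h => hcd (h ▸ ((PySem.Set.mem_ofList _ _).mp hk))
          rw [hcount_ne k hkc]
        rw [h1, hpc]
        cases t
        · simp
        · simp; ring
      -- assemble
      have hlen_d : d.length < n := by
        have : rest.length = t.length + d.length := by rw [hrest, List.length_append]
        simp at hn; omega
      obtain ⟨p', rl', hfold⟩ := ih d.length hlen_d d hdp (runs + 1)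
        (rep + (if t = [] then 0 else 1)) (some c) (1 + (t.length : Int))
        (fun x hx y hy => by cases hx; exact hdlb y hy) rfl
      have hsplit : (c :: rest).foldl pvRunStep (runs, rep, p, rl)
          = (runs + 1 + pvD d, (rep + (if t = [] then 0 else 1)) + pvR d, p', rl') := by
        rw [List.foldl_cons, hstep]
        conv_lhs => rw [hrest]
        rw [List.foldl_append, pv_run_one c t htc, hfold]
      refine ⟨p', rl', ?_⟩
      rw [hsplit, hD, hR]
      simp [add_assoc]


-- A's per-column body equals B's per-column body
theorem pv_class_eq (st : Int × Int × Int × Int × Int) (chars : List Char) :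
    pvClassA st chars = pvColStep st chars := by
  obtain ⟨v, sg, pin, cst, amb⟩ := st
  unfold pvClassA pvColStep
  simp only [pvAmbB_eq]
  set clean := chars.filter (fun c => !pvAmb c) with hclean
  set sclean := PySem.List.sorted clean (fun c => c) false with hsc
  have hpair : sclean.Pairwise (· ≤ ·) := by
    simpa using PySem.List.sorted_pairwise clean (fun c => c)
  obtain ⟨p', rl', hfold⟩ := pvRunFold_sorted sclean hpair 0 0 none 0 (by intro x hx; cases hx)
  have hperm : sclean.Perm clean := PySem.List.sorted_perm clean (fun c => c) false
  have hcnt : ∀ k, sclean.count k = clean.count k := fun k => hperm.count_eq k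
  have hset : (PySem.Set.ofList sclean).Perm (PySem.Set.ofList clean) :=
    (List.perm_ext_iff_of_nodup (PySem.Set.nodup_ofList _) (PySem.Set.nodup_ofList _)).mpr
      (fun x => by simp [PySem.Set.mem_ofList, hperm.mem_iff])
  have hD : pvD sclean = ((PySem.Set.ofList clean).length : Int) := by
    simp [pvD, hset.length_eq]
  have hR : pvR sclean
      = (((PySem.Set.ofList clean).countP (fun k => 2 ≤ clean.count k) : Nat) : Int) := by
    unfold pvR
    rw [show (fun k => decide (2 ≤ sclean.count k)) = (fun k => decide (2 ≤ clean.count k))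
      from funext (fun k => by rw [hcnt]), hset.countP_eq]
  have hvals : (PySem.Dict.counter clean : PySem.Dict Char Int).values
      = (PySem.Set.ofList clean).map (fun k => ((clean.count k : Nat) : Int)) := by
    simp [PySem.Dict.values, PySem.Dict.items_counter, List.map_map, Function.comp_def]
  have hrep : ((PySem.Dict.counter clean).values.filter (fun n => decide (2 ≤ n))).length
      = (PySem.Set.ofList clean).countP (fun k => 2 ≤ clean.count k) := by
    rw [hvals, ← List.countP_eq_length_filter, List.countP_map]
    apply List.countP_congr
    intro k _
    simp
  have hlen : sclean.length = clean.length := PySem.List.length_sorted clean (fun c => c) false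
  have hambiff : (chars.any pvAmb = true) ↔ (sclean.length < chars.length) := by
    rw [hlen, hclean, List.length_filter_lt_length_iff_exists, List.any_eq_true]
    constructor
    · rintro ⟨x, hx, hpx⟩; exact ⟨x, hx, by simp [hpx]⟩
    · rintro ⟨x, hx, hpx⟩; exact ⟨x, hx, by simpa using hpx⟩
  have hambeq : (if chars.any pvAmb then amb + 1 else amb)
      = (if sclean.length < chars.length then amb + 1 else amb) := by
    by_cases h : chars.any pvAmb = true
    · rw [if_pos h, if_pos (hambiff.mp h)]
    · rw [if_neg h, if_neg (fun hc => h (hambiff.mpr hc))]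
  rw [hfold, hambeq, hrep]
  dsimp only
  generalize (if sclean.length < chars.length then amb + 1 else amb) = amb2
  by_cases h1 : (PySem.Set.ofList clean).length ≤ 1
  · have h1' : (0 : Int) + pvD sclean ≤ 1 := by rw [hD]; omega
    rw [if_pos h1, if_pos h1']
  · have h1' : ¬ ((0 : Int) + pvD sclean ≤ 1) := by rw [hD]; omega
    rw [if_neg h1, if_neg h1']
    by_cases h2 : 2 ≤ (PySem.Set.ofList clean).countP (fun k => 2 ≤ clean.count k)
    · have h2' : (2 : Int) ≤ 0 + pvR sclean := by rw [hR]; omega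
      rw [if_pos h2, if_pos h2']
    · have h2' : ¬ ((2 : Int) ≤ 0 + pvR sclean) := by rw [hR]; omega
      rw [if_neg h2, if_neg h2']

-- zip(*ls) under 'first list is shortest' is the list of columns 0..L-1
theorem pvZipStarAux_eq (L : Nat) (f : List Char) (rest : List (List Char))
    (hf : L ≤ f.length) (hall : ∀ l ∈ rest, L ≤ l.length)
    (hex : f.length = L ∨ ∃ l ∈ rest, l.length = L) :
    pvZipStarAux f rest
      = (List.range L).map (fun i => (f :: rest).map (fun l => l.getD i ' ')) := by
  induction L generalizing f rest with
  | zero =>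
      simp only [List.range_zero, List.map_nil]
      rcases hex with h | ⟨l, hl, hl0⟩
      · rw [List.length_eq_zero_iff.mp h]; rfl
      · cases f with
        | nil => rfl
        | cons a t =>
            have : ¬ (rest.all (fun r => !r.isEmpty) = true) := by
              intro hc
              have := (List.all_eq_true.mp hc) l hl
              simp [List.length_eq_zero_iff.mp hl0] at this
            simp [pvZipStarAux, this]
  | succ L ih =>
      cases f with
      | nil => simp at hf
      | cons a t =>
          have hguard : rest.all (fun r => !r.isEmpty) = true := by
            refine List.all_eq_true.mpr (fun l hl => ?_)
            have := hall l hl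
            simp
            intro h; rw [h] at this; simp at this
          have hrec := ih t (rest.map (fun r => r.tail))
            (by simpa using hf)
            (by
              intro l hl
              rcases List.mem_map.mp hl with ⟨r, hr, rfl⟩
              have := hall r hr
              simp [List.length_tail]; omega)
            (by
              rcases hex with h | ⟨l, hl, hlen⟩
              · left; simpa using h
              · right
                exact ⟨l.tail, List.mem_map.mpr ⟨l, hl, rfl⟩, by simp [List.length_tail, hlen]⟩)
          rw [List.range_succ_eq_map]
          simp only [List.map_cons, pvZipStarAux, hguard, if_pos, hrec, List.map_map]
          refine List.cons_eq_cons.mpr ⟨?_, ?_⟩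
          · refine List.cons_eq_cons.mpr ⟨rfl, List.map_congr_left (fun r hr => ?_)⟩
            have hne : r ≠ [] := by
              have := (List.all_eq_true.mp hguard) r hr
              simpa [List.isEmpty_iff] using this
            cases r with
            | nil => exact absurd rfl hne
            | cons x xs => rfl
          · refine List.map_congr_left (fun i _ => ?_)
            simp only [Function.comp]
            refine List.cons_eq_cons.mpr ⟨rfl, List.map_congr_left (fun r hr => ?_)⟩
            cases r <;> rfl

theorem pvZipStar_eq (L : Nat) (ls : List (List Char))
    (hne : ls ≠ []) (hall : ∀ l ∈ ls, L ≤ l.length) (hex : ∃ l ∈ ls, l.length = L) :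
    pvZipStar ls = (List.range L).map (fun i => ls.map (fun l => l.getD i ' ')) := by
  cases ls with
  | nil => exact absurd rfl hne
  | cons f rest =>
      show pvZipStarAux f rest = _
      rcases hex with ⟨l, hl, hlen⟩
      rcases List.mem_cons.mp hl with hfl | hl'
      · subst hfl
        exact pvZipStarAux_eq L l rest (le_of_eq hlen.symm)
          (fun l' hl' => hall l' (by simp [hl'])) (Or.inl hlen)
      · exact pvZipStarAux_eq L f rest (hall f (by simp))
          (fun l' hl' => hall l' (by simp [hl'])) (Or.inr ⟨l, hl', hlen⟩)

-- s[i] with a natural index is toList.getD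
theorem pv_pyGet_getD (s : String) (i : Nat) :
    (PySem.Str.pyGet? s (i : Int)).getD ' ' = s.toList.getD i ' ' := by
  simp only [PySem.Str.pyGet?, PySem.Chars.pyGet?, PySem.List.pyGet?, PySem.List.pyIdx?]
  by_cases h : i < s.length
  · simp [h, List.getD]
  · simp [h, List.getD]

-- ===== VERDICT (by name: the statement is the Claim_ definition above) =====
theorem site_classification_spec : Claim_equal_site_classification := by
  intro records _ hpre
  unfold Spec_site_classification
  obtain ⟨hne, hall⟩ := hpre
  cases records with
  | nil => exact absurd rfl hne
  | cons r rs =>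
      simp only [site_classification, site_classification_alt]
      have hget : PySem.List.pyGet? ((r :: rs).map (fun p => p.2)) 0 = some r.2 := by
        simp [PySem.List.pyGet?, PySem.List.pyIdx?]
      rw [hget]
      dsimp only
      set seqs := (r :: rs).map (fun p => p.2) with hseqs
      set ls := (r :: rs).map (fun p => p.2.toList) with hls
      set L := r.2.toList.length with hL
      have hlseq : ls = seqs.map (fun s => s.toList) := by
        rw [hseqs, hls, List.map_map]; rfl
      have hcols : pvZipStar ls = (List.range L).map (fun i => ls.map (fun l => l.getD i ' ')) := by
        apply pvZipStar_eq
        · simp [hls]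
        · intro l hl
          rw [hls] at hl
          rcases List.mem_map.mp hl with ⟨p, hp, rfl⟩
          exact hall p hp
        · exact ⟨r.2.toList, by simp [hls], rfl⟩
      have hfun : pvStepA seqs = fun st i => pvColStep st (ls.map (fun l => l.getD i ' ')) := by
        funext st i
        rw [pvStepA_eq, pv_class_eq]
        have hmaps : seqs.map (fun s => (PySem.Str.pyGet? s (i : Int)).getD ' ')
            = ls.map (fun l => l.getD i ' ') := by
          rw [hlseq]
          simp only [List.map_map]
          refine List.map_congr_left ?_
          intro p hp
          exact pv_pyGet_getD p i
        rw [hmaps]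
      rw [hcols, List.foldl_map, hfun]
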